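-- pv_equiv track=rewrite | github.com/Anisha7/Python-Algorithms | lesson1/lab/lab1.py | getKthDigit
-- ===== SOURCE A (Python) =====
-- def getKthDigit(n, k):
--     if not isinstance(n,int) or isinstance(n,float):
--         return None
--     elif n==0:
--         return None
--     n=abs(n)
--     #if k <= 0:
--         #return False
--     if isinstance(n, int) and isinstance(k, int):
--         for i in range(k):
--             n//=10
--         return n%10
--     else:
--         return False
-- ===== SOURCE B (Python) =====
-- def getKthDigit(n, k):
--     if not isinstance(n, int) or isinstance(n, float):
--         return None
--     if n == 0:
--         return None
--     if not isinstance(k, int):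
--         return False
--     return abs(n) // 10 ** (k if k > 0 else 0) % 10
-- ===== Notes on version B (the rewrite author's own statement) =====
-- stated objective: simpler
-- what changed: Replaces the k-iteration digit-stripping loop (n //= 10 repeated k times) with a single closed-form extraction abs(n) // 10**max(k,0) % 10.
import Mathlib
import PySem

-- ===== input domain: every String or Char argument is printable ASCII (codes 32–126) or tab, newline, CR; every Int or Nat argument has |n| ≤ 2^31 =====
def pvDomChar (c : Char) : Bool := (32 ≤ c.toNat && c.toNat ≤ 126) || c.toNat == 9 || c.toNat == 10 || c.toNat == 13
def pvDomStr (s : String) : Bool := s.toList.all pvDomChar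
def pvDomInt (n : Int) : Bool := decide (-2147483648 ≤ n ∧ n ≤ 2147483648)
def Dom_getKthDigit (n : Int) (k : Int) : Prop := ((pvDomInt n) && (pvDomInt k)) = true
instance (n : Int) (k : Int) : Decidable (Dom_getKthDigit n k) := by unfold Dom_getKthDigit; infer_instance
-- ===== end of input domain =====

-- B replaces A's k-step digit-stripping loop with one closed-form extraction abs(n) // 10**max(k,0) % 10 (simpler; not claimed faster).
-- ===== PORT A =====
-- loop 'for i in range(k): n //= 10' then 'return n % 10'
def getKthDigit (n : Int) (k : Int) : Option Int :=
  if n = 0 then none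
  else
    let m := (PySem.List.pyRange 0 k 1).foldl (fun acc _ => PySem.Int.floordiv acc 10) (n.natAbs : Int)
    some (PySem.Int.mod m 10)

-- ===== PORT B =====
-- closed form: abs(n) // 10**max(k,0) % 10
def getKthDigit_alt (n : Int) (k : Int) : Option Int :=
  if n = 0 then none
  else some (PySem.Int.mod (PySem.Int.floordiv (n.natAbs : Int) ((10 : Int) ^ (if k > 0 then k.toNat else 0))) 10)

-- ===== PRECONDITION & SPEC =====
def Spec_getKthDigit (n : Int) (k : Int) (out : Option Int) : Prop := out = getKthDigit_alt n k
instance (n : Int) (k : Int) (out : Option Int) : Decidable (Spec_getKthDigit n k out) := by unfold Spec_getKthDigit; infer_instance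

-- ===== CLAIM (what is proved, stated in full; the proofs are below) =====
def Claim_equal_getKthDigit : Prop := ∀ (n : Int) (k : Int), Dom_getKthDigit n k → Spec_getKthDigit n k (getKthDigit n k)

-- ===== LEMMAS AND PROOFS =====

theorem foldl_floordiv_pow (l : List Int) (m : Int) :
    l.foldl (fun acc _ => PySem.Int.floordiv acc 10) m
      = PySem.Int.floordiv m ((10 : Int) ^ l.length) := by
  induction l generalizing m with
  | nil =>
      rw [List.foldl_nil, List.length_nil, pow_zero,
          PySem.Int.floordiv_eq_ediv_of_pos (by norm_num), Int.ediv_one]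
  | cons x xs ih =>
      simp only [List.foldl_cons, ih, List.length_cons]
      rw [PySem.Int.floordiv_eq_ediv_of_pos (by positivity),
          PySem.Int.floordiv_eq_ediv_of_pos (by norm_num),
          PySem.Int.floordiv_eq_ediv_of_pos (by positivity),
          Int.ediv_ediv_of_nonneg (by norm_num)]
      ring_nf

-- ===== VERDICT (by name: the statement is the Claim_ definition above) =====
theorem getKthDigit_spec : Claim_equal_getKthDigit := by
  intro n k _
  unfold Spec_getKthDigit getKthDigit getKthDigit_alt
  by_cases h : n = 0
  · simp [h]
  · simp only [if_neg h]
    rw [foldl_floordiv_pow, PySem.List.length_pyRange_one]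
    have he : (k - 0).toNat = (if k > 0 then k.toNat else 0) := by split <;> omega
    rw [he]
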